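-- pv_equiv track=rewrite | github.com/inetgas/arch-compiler | tools/archcompiler.py | _find_conflict_group
-- ===== SOURCE A (Python) =====
-- from typing import Any, Dict, List, Optional, Tuple
--
-- def _find_conflict_group(
--     start_pid: str,
--     conflict_graph: Dict[str, set],
--     available_pids: set
-- ) -> set:
--     """
--     Find all patterns in the same conflict group using graph traversal.
--
--     Uses BFS to find all patterns that are transitively conflicting with start_pid.
--
--     Args:
--         start_pid: Starting pattern ID
--         conflict_graph: Bidirectional conflict graph (pid -> set of conflicting pids)
--         available_pids: Set of pattern IDs available for selection
--
--     Returns: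
--         Set of pattern IDs in the same conflict group
--     """
--     visited = set()
--     queue = [start_pid]
--     group = {start_pid}
--
--     while queue:
--         current = queue.pop(0)
--         if current in visited:
--             continue
--         visited.add(current)
--
--         # Find all patterns that conflict with current pattern
--         for conflict_pid in conflict_graph.get(current, set()):
--             if conflict_pid in available_pids and conflict_pid not in visited:
--                 group.add(conflict_pid)
--                 queue.append(conflict_pid)
--
--     return group
-- ===== SOURCE B (Python) =====
-- def _find_conflict_group(start_pid, conflict_graph, available_pids):
--     # Round-based closure: repeatedly sweep the whole group, adding every
--     # available neighbour of every member, until a full sweep adds nothing.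
--     group = {start_pid}
--     changed = True
--     while changed:
--         changed = False
--         for p in list(group):
--             for c in conflict_graph.get(p, set()):
--                 if c in available_pids and c not in group:
--                     group.add(c)
--                     changed = True
--     return group
-- ===== Notes on version B (the rewrite author's own statement) =====
-- stated objective: alternative
-- what changed: Replaced the BFS with an explicit FIFO queue and visited set by a round-based fixpoint closure: repeatedly sweep every current group member adding its available neighbours, until a full sweep adds nothing; no queue, no visited set, no index.
import Mathlib
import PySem

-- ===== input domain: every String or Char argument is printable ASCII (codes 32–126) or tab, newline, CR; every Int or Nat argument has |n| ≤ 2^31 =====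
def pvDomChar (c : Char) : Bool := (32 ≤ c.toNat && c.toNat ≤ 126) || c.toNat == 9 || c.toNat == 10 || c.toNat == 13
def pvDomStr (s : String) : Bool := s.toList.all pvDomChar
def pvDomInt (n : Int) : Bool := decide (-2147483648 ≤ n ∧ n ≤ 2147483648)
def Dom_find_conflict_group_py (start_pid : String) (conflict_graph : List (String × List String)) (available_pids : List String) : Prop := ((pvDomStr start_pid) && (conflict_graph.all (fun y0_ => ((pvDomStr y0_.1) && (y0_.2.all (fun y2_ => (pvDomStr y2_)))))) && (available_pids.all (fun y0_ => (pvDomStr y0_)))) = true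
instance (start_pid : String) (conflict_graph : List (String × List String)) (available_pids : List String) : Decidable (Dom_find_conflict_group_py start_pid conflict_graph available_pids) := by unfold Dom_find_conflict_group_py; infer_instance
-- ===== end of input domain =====

-- B replaces A's queue-and-visited BFS by a round-based fixpoint closure (sweep all members until a sweep adds nothing); same result set.

-- shared helper: conflict_graph.get(k, set()) — first-match association-list lookup (dict semantics)
def pvGetNbrs : List (String × List String) → String → List String
  | [], _ => []
  | (k, v) :: rest, c => if k == c then v else pvGetNbrs rest c

-- ===== PORT A =====
-- body of A's inner 'for conflict_pid in conflict_graph.get(current, set())' loop; state = (group, queue)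
def pvAInner (available_pids : List String) (visited : PySem.Set String)
    (st : PySem.Set String × List String) (conflict_pid : String) : PySem.Set String × List String :=
  if available_pids.contains conflict_pid && !(PySem.Set.contains visited conflict_pid) then
    (PySem.Set.add st.1 conflict_pid, st.2 ++ [conflict_pid])
  else st

-- A's 'while queue:' loop. fuel bounds the number of iterations: each iteration pops one element and
-- total appends over the whole run are at most the total adjacency length, so 1 + Σ|adjacency| suffices
-- (the top-level call never runs out).
def pvALoop (conflict_graph : List (String × List String)) (available_pids : List String) :
    Nat → PySem.Set String → List String → PySem.Set String → PySem.Set String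
  | 0, _, _, group => group
  | fuel+1, visited, queue, group =>
    match queue with
    | [] => group
    | current :: rest =>
      if PySem.Set.contains visited current then
        pvALoop conflict_graph available_pids fuel visited rest group
      else
        let visited' := PySem.Set.add visited current
        let st := (pvGetNbrs conflict_graph current).foldl (pvAInner available_pids visited') (group, rest)
        pvALoop conflict_graph available_pids fuel visited' st.2 st.1

def find_conflict_group_py (start_pid : String) (conflict_graph : List (String × List String)) (available_pids : List String) : List String :=
  pvALoop conflict_graph available_pids (1 + (conflict_graph.map (fun p => p.2.length)).sum)
    PySem.Set.empty [start_pid] (PySem.Set.add PySem.Set.empty start_pid)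

-- ===== PORT B =====
-- body of B's innermost 'for c in conflict_graph.get(p, set())' loop; state = (group, changed)
def pvBInner2 (available_pids : List String) (st : List String × Bool) (c : String) : List String × Bool :=
  if available_pids.contains c && !(st.1.contains c) then (st.1 ++ [c], true) else st

-- one member p of the sweep: 'for c in conflict_graph.get(p, set()): …'
def pvNbrFold (conflict_graph : List (String × List String)) (available_pids : List String)
    (st : List String × Bool) (p : String) : List String × Bool :=
  (pvGetNbrs conflict_graph p).foldl (pvBInner2 available_pids) st

-- one full sweep: 'changed = False; for p in list(group): …' (the snapshot list(group) is group itself)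
def pvPass (conflict_graph : List (String × List String)) (available_pids : List String)
    (group : List String) : List String × Bool :=
  group.foldl (pvNbrFold conflict_graph available_pids) (group, false)

-- B's 'while changed:' loop; fuel: every round but the last adds at least one element and at most
-- Σ|adjacency| elements are ever added, so 2 + Σ|adjacency| rounds suffice.
def pvFix (conflict_graph : List (String × List String)) (available_pids : List String) :
    Nat → List String → List String
  | 0, group => group
  | fuel+1, group =>
    let st := pvPass conflict_graph available_pids group
    if st.2 then pvFix conflict_graph available_pids fuel st.1 else st.1

def find_conflict_group_py_alt (start_pid : String) (conflict_graph : List (String × List String)) (available_pids : List String) : List String :=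
  pvFix conflict_graph available_pids (2 + (conflict_graph.map (fun p => p.2.length)).sum) [start_pid]

-- ===== PRECONDITION & SPEC =====
def Spec_find_conflict_group_py (start_pid : String) (conflict_graph : List (String × List String)) (available_pids : List String) (out : List String) : Prop := out = find_conflict_group_py_alt start_pid conflict_graph available_pids
instance (start_pid : String) (conflict_graph : List (String × List String)) (available_pids : List String) (out : List String) : Decidable (Spec_find_conflict_group_py start_pid conflict_graph available_pids out) := by unfold Spec_find_conflict_group_py; infer_instance

-- ===== CLAIM (what is proved, stated in full; the proofs are below) =====
def Claim_equal_find_conflict_group_py : Prop := ∀ (start_pid : String) (conflict_graph : List (String × List String)) (available_pids : List String), Dom_find_conflict_group_py start_pid conflict_graph available_pids → Spec_find_conflict_group_py start_pid conflict_graph available_pids (find_conflict_group_py start_pid conflict_graph available_pids)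

-- ===== LEMMAS AND PROOFS =====

-- ---- proof-side reference loop: A's BFS flattened to an index scan over one growing list ----
def pvBInner (available_pids : List String) (order : List String) (c : String) : List String :=
  if available_pids.contains c && !(order.contains c) then order ++ [c] else order

def pvBLoop (conflict_graph : List (String × List String)) (available_pids : List String) :
    Nat → List String → Nat → List String
  | 0, order, _ => order
  | fuel+1, order, i =>
    if i < order.length then
      pvBLoop conflict_graph available_pids fuel
        ((pvGetNbrs conflict_graph (order.getD i "")).foldl (pvBInner available_pids) order) (i+1)
    else order

-- pending work of A's state: the distinct not-yet-visited queue entries in first-occurrence order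
def pvPend (visited queue : List String) : List String :=
  PySem.Set.ofList (queue.filter (fun c => !(PySem.Set.contains visited c)))

-- potential: total adjacency length still chargeable to unvisited keys (fuel bound for A)
def pvPot (g : List (String × List String)) (visited : List String) : Nat :=
  (g.map (fun p => if PySem.Set.contains visited p.1 then 0 else p.2.length)).sum

theorem pvContains_append_right (visited : List String) (current x : String)
    (h : PySem.Set.contains visited x = true) :
    PySem.Set.contains (visited ++ [current]) x = true := by
  rw [PySem.Set.contains_iff] at h ⊢
  exact List.mem_append_left _ h

theorem pvFoldl_add_cons (l : List String) (c : String) (s : List String) :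
    List.foldl PySem.Set.add (c :: s) l
      = c :: List.foldl PySem.Set.add s (l.filter (fun x => !(x == c))) := by
  induction l generalizing s with
  | nil => simp
  | cons x xs ih =>
    by_cases hx : x = c
    · subst hx
      have hadd : PySem.Set.add (x :: s) x = x :: s :=
        PySem.Set.add_of_mem List.mem_cons_self
      simp [ih]
    · by_cases hm : x ∈ s
      · have h1 : PySem.Set.add (c :: s) x = c :: s :=
          PySem.Set.add_of_mem (List.mem_cons_of_mem _ hm)
        have h2 : PySem.Set.add s x = s := PySem.Set.add_of_mem hm
        simp [hx, h1, h2, ih]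
      · have hmc : x ∉ c :: s := by
          intro hc
          rcases List.mem_cons.1 hc with h | h
          · exact hx h
          · exact hm h
        have h1 : PySem.Set.add (c :: s) x = c :: (s ++ [x]) :=
          PySem.Set.add_of_not_mem hmc
        have h2 : PySem.Set.add s x = s ++ [x] := PySem.Set.add_of_not_mem hm
        simp [hx, h1, h2, ih]

theorem pvPend_cons_mem (visited : List String) (current : String) (rest : List String)
    (h : PySem.Set.contains visited current = true) :
    pvPend visited (current :: rest) = pvPend visited rest := by
  have hm : current ∈ visited := (PySem.Set.contains_iff _ _).1 h
  simp [pvPend, hm]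

theorem pvPend_cons (visited : List String) (current : String) (rest : List String)
    (h : PySem.Set.contains visited current = false) :
    pvPend visited (current :: rest) = current :: pvPend (visited ++ [current]) rest := by
  have hm : current ∉ visited := fun hmm => by
    rw [(PySem.Set.contains_iff _ _).2 hmm] at h; cases h
  have h1 : (current :: rest).filter (fun c => !(PySem.Set.contains visited c))
      = current :: rest.filter (fun c => !(PySem.Set.contains visited c)) := by
    simp [hm]
  have hfil : (rest.filter (fun c => !(PySem.Set.contains visited c))).filter
        (fun x => !(x == current))
      = rest.filter (fun c => !(PySem.Set.contains (visited ++ [current]) c)) := by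
    rw [List.filter_filter]
    apply List.filter_congr
    intro x hx
    by_cases he : x = current
    · subst he
      simp [List.mem_append]
    · by_cases hxv : x ∈ visited
      · simp [List.mem_append, hxv]
      · simp [List.mem_append, hxv, he]
  rw [pvPend, pvPend, h1, PySem.Set.ofList_eq_foldl, PySem.Set.ofList_eq_foldl,
    List.foldl_cons]
  rw [show PySem.Set.add ([] : List String) current = [current] from rfl, pvFoldl_add_cons]
  rw [hfil]

theorem pvPend_append (visited q : List String) (c : String)
    (h : PySem.Set.contains visited c = false) :
    pvPend visited (q ++ [c]) = PySem.Set.add (pvPend visited q) c := by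
  have hm : c ∉ visited := fun hmm => by
    rw [(PySem.Set.contains_iff _ _).2 hmm] at h; cases h
  rw [pvPend, pvPend, List.filter_append]
  have h1 : [c].filter (fun x => !(PySem.Set.contains visited x)) = [c] := by
    simp [hm]
  rw [h1]
  exact PySem.Set.ofList_append_singleton _ _

theorem pvGetNbrs_subset (g : List (String × List String)) (c : String) :
    ∀ x ∈ pvGetNbrs g c, x ∈ (g.map (·.2)).flatten := by
  induction g with
  | nil => simp [pvGetNbrs]
  | cons p g ih =>
    obtain ⟨k, v⟩ := p
    intro x hx
    simp only [pvGetNbrs] at hx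
    by_cases hk : (k == c) = true
    · rw [if_pos hk] at hx
      simp [hx]
    · rw [if_neg hk] at hx
      simp [ih x hx]

theorem pvPot_mono (g : List (String × List String)) (visited visited' : List String)
    (h : ∀ x, PySem.Set.contains visited x = true → PySem.Set.contains visited' x = true) :
    pvPot g visited' ≤ pvPot g visited := by
  induction g with
  | nil => simp [pvPot]
  | cons p g ih =>
    simp only [pvPot, List.map_cons, List.sum_cons] at *
    have hterm : (if PySem.Set.contains visited' p.1 then 0 else p.2.length)
        ≤ (if PySem.Set.contains visited p.1 then 0 else p.2.length) := by
      by_cases hm : p.1 ∈ visited'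
      · simp [hm]
      · have hmv : p.1 ∉ visited := fun hx =>
          hm ((PySem.Set.contains_iff _ _).1 (h p.1 ((PySem.Set.contains_iff _ _).2 hx)))
        simp [hm, hmv]
    omega

theorem pvPot_step (g : List (String × List String)) (visited : List String) (current : String)
    (h : PySem.Set.contains visited current = false) :
    (pvGetNbrs g current).length + pvPot g (visited ++ [current]) ≤ pvPot g visited := by
  induction g with
  | nil => simp [pvGetNbrs, pvPot]
  | cons p g ih =>
    obtain ⟨k, v⟩ := p
    simp only [pvGetNbrs, pvPot, List.map_cons, List.sum_cons] at *
    by_cases hk : (k == current) = true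
    · have hkc : k = current := by simpa using hk
      subst hkc
      have hc1 : PySem.Set.contains (visited ++ [k]) k = true :=
        (PySem.Set.contains_iff _ _).2 (List.mem_append_right _ List.mem_cons_self)
      rw [if_pos hk]
      simp only [hc1, h, if_true, if_false, Bool.false_eq_true]
      have hmono : pvPot g (visited ++ [k]) ≤ pvPot g visited :=
        pvPot_mono g _ _ (fun x hx => pvContains_append_right _ _ _ hx)
      simp only [pvPot] at hmono
      omega
    · have hne : k ≠ current := fun e => hk (by simp [e])
      have hOK : PySem.Set.contains (visited ++ [current]) k
          = PySem.Set.contains visited k := by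
        cases hc : PySem.Set.contains visited k
        · rw [← Bool.not_eq_true]
          intro hcc
          rcases List.mem_append.1 ((PySem.Set.contains_iff _ _).1 hcc) with hm | hm
          · rw [(PySem.Set.contains_iff _ _).2 hm] at hc; cases hc
          · exact hne (List.mem_singleton.1 hm)
        · exact pvContains_append_right _ _ _ hc
      rw [if_neg hk, hOK]
      omega

theorem pvAInner_len (available_pids : List String) (visited : PySem.Set String)
    (L : List String) (st : PySem.Set String × List String) :
    (L.foldl (pvAInner available_pids visited) st).2.length ≤ st.2.length + L.length := by
  induction L generalizing st with
  | nil => simp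
  | cons c L ih =>
    simp only [List.foldl_cons, List.length_cons]
    have hstep : (pvAInner available_pids visited st c).2.length ≤ st.2.length + 1 := by
      unfold pvAInner
      split <;> simp
    have := ih (pvAInner available_pids visited st c)
    omega

theorem pvBLoop_done (g : List (String × List String)) (av : List String) (f : Nat)
    (order : List String) (i : Nat) (h : order.length ≤ i) :
    pvBLoop g av f order i = order := by
  cases f with
  | zero => rfl
  | succ f => simp [pvBLoop, Nat.not_lt.2 h]

theorem pvBInner_nodup (av : List String) (L : List String) :
    ∀ acc : List String, acc.Nodup → (L.foldl (pvBInner av) acc).Nodup := by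
  induction L with
  | nil => intro acc h; exact h
  | cons c L ih =>
    intro acc h
    simp only [List.foldl_cons]
    apply ih
    unfold pvBInner
    split
    · rename_i hcond
      have hc : c ∉ acc := by
        rcases Bool.and_eq_true_iff.mp hcond with ⟨-, h2⟩
        simpa using h2
      simp [List.nodup_append, h]
      exact fun a ha hac => hc (hac ▸ ha)
    · exact h

theorem pvFold_sim (av vis' : List String) (allU : List String) :
    ∀ (L : List String) (acc q : List String) (j : Nat),
    pvPend vis' q = acc.drop j →
    acc.take j = vis' →
    acc.Nodup →
    (∀ x ∈ L, x ∈ allU) →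
    (∀ x ∈ acc, x ∈ allU) →
    j ≤ acc.length →
    (L.foldl (pvAInner av vis') (acc, q)).1 = L.foldl (pvBInner av) acc
    ∧ pvPend vis' (L.foldl (pvAInner av vis') (acc, q)).2 = (L.foldl (pvBInner av) acc).drop j
    ∧ (L.foldl (pvBInner av) acc).take j = vis'
    ∧ (L.foldl (pvBInner av) acc).Nodup
    ∧ (∀ x ∈ L.foldl (pvBInner av) acc, x ∈ allU)
    ∧ j ≤ (L.foldl (pvBInner av) acc).length := by
  intro L
  induction L with
  | nil =>
    intro acc q j h1 h2 h3 _ h5 hj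
    exact ⟨rfl, h1, h2, h3, h5, hj⟩
  | cons c L ih =>
    intro acc q j h1 h2 h3 h4 h5 hj
    simp only [List.foldl_cons]
    have h4' : ∀ x ∈ L, x ∈ allU := fun x hx => h4 x (List.mem_cons_of_mem _ hx)
    cases hav : av.contains c
    · have havn : c ∉ av := by simpa using hav
      have eA : pvAInner av vis' (acc, q) c = (acc, q) := by
        simp [pvAInner, havn]
      have eB : pvBInner av acc c = acc := by
        simp [pvBInner, havn]
      rw [eA, eB]
      exact ih acc q j h1 h2 h3 h4' h5 hj
    · by_cases hv : PySem.Set.contains vis' c = true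
      · have eA : pvAInner av vis' (acc, q) c = (acc, q) := by
          simp [pvAInner, (PySem.Set.contains_iff _ _).1 hv]
        have hmem : c ∈ acc := by
          have : c ∈ vis' := (PySem.Set.contains_iff _ _).1 hv
          rw [← h2] at this
          exact List.mem_of_mem_take this
        have eB : pvBInner av acc c = acc := by
          simp [pvBInner, hmem]
        rw [eA, eB]
        exact ih acc q j h1 h2 h3 h4' h5 hj
      · have hv' : PySem.Set.contains vis' c = false := by
          cases hvv : PySem.Set.contains vis' c
          · rfl
          · exact absurd hvv hv
        have hcv : c ∉ vis' := fun hm => hv ((PySem.Set.contains_iff _ _).2 hm)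
        by_cases hacc : c ∈ acc
        · have havm : c ∈ av := by simpa using hav
          have eA : pvAInner av vis' (acc, q) c
              = (PySem.Set.add acc c, q ++ [c]) := by
            simp [pvAInner]
            exact ⟨havm, hcv⟩
          have eA1 : PySem.Set.add acc c = acc := PySem.Set.add_of_mem hacc
          have eB : pvBInner av acc c = acc := by
            simp [pvBInner, hacc]
          rw [eA, eA1, eB]
          have hdrop : c ∈ acc.drop j := by
            rcases (List.mem_append.1 (by rw [List.take_append_drop j acc]; exact hacc :
                c ∈ acc.take j ++ acc.drop j)) with hm | hm
            · exact absurd (h2 ▸ hm) hcv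
            · exact hm
          have h1' : pvPend vis' (q ++ [c]) = acc.drop j := by
            rw [pvPend_append _ _ _ hv', h1]
            exact PySem.Set.add_of_mem hdrop
          exact ih acc (q ++ [c]) j h1' h2 h3 h4' h5 hj
        · have havm : c ∈ av := by simpa using hav
          have eA : pvAInner av vis' (acc, q) c
              = (PySem.Set.add acc c, q ++ [c]) := by
            simp [pvAInner]
            exact ⟨havm, hcv⟩
          have eA1 : PySem.Set.add acc c = acc ++ [c] := PySem.Set.add_of_not_mem hacc
          have eB : pvBInner av acc c = acc ++ [c] := by
            simp [pvBInner, havm, hacc]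
          rw [eA, eA1, eB]
          have hndrop : c ∉ acc.drop j := fun hm => hacc (List.mem_of_mem_drop hm)
          have h1' : pvPend vis' (q ++ [c]) = (acc ++ [c]).drop j := by
            rw [pvPend_append _ _ _ hv', h1, PySem.Set.add_of_not_mem hndrop,
              List.drop_append_of_le_length hj]
          have h2' : (acc ++ [c]).take j = vis' := by
            rw [List.take_append_of_le_length hj, h2]
          have h3' : (acc ++ [c]).Nodup := by
            simp [List.nodup_append, h3]
            exact fun a ha hac => hacc (hac ▸ ha)
          have h5' : ∀ x ∈ acc ++ [c], x ∈ allU := by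
            intro x hx
            rcases List.mem_append.1 hx with hm | hm
            · exact h5 x hm
            · rw [List.mem_singleton.1 hm]
              exact h4 c List.mem_cons_self
          have hj' : j ≤ (acc ++ [c]).length := by
            rw [List.length_append]
            omega
          exact ih (acc ++ [c]) (q ++ [c]) j h1' h2' h3' h4' h5' hj'

theorem pvSim (g : List (String × List String)) (av : List String) (allU : List String)
    (hU : ∀ x ∈ (g.map (·.2)).flatten, x ∈ allU) :
    ∀ fA fB (visited queue order : List String) (i : Nat),
      pvPend visited queue = order.drop i →
      order.take i = visited →
      order.Nodup →
      (∀ x ∈ order, x ∈ allU) →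
      queue.length + pvPot g visited ≤ fA →
      allU.length ≤ fB + i →
      pvALoop g av fA visited queue order = pvBLoop g av fB order i := by
  intro fA
  induction fA with
  | zero =>
    intro fB visited queue order i h1 h2 h3 h4 hfA hfB
    have hq : queue = [] := by
      cases queue with
      | nil => rfl
      | cons a as => simp at hfA
    subst hq
    have : order.drop i = [] := by rw [← h1]; rfl
    rw [pvALoop, pvBLoop_done g av fB order i (by
      have := List.drop_eq_nil_iff.1 this
      omega)]
  | succ fA ih =>
    intro fB visited queue order i h1 h2 h3 h4 hfA hfB
    cases queue with
    | nil =>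
      have : order.drop i = [] := by rw [← h1]; rfl
      rw [pvALoop, pvBLoop_done g av fB order i (by
        have := List.drop_eq_nil_iff.1 this
        omega)]
    | cons current rest =>
      cases hv : PySem.Set.contains visited current
      · have hpc : pvPend visited (current :: rest)
            = current :: pvPend (visited ++ [current]) rest := pvPend_cons _ _ _ hv
        have hdrop : order.drop i = current :: pvPend (visited ++ [current]) rest := by
          rw [← h1, hpc]
        have hi : i < order.length := by
          by_contra hge
          rw [List.drop_eq_nil_of_le (by omega)] at hdrop
          cases hdrop
        have hgetE : order.drop i = order[i] :: order.drop (i + 1) :=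
          List.drop_eq_getElem_cons hi
        have hcur : order[i] = current := by
          rw [hgetE] at hdrop
          exact (List.cons.injEq _ _ _ _ ▸ hdrop).1
        have hpend' : pvPend (visited ++ [current]) rest = order.drop (i + 1) := by
          rw [hgetE, hcur] at hdrop
          exact ((List.cons.injEq _ _ _ _ ▸ hdrop).2).symm
        have htake' : order.take (i + 1) = visited ++ [current] := by
          rw [List.take_add_one, h2]
          simp [List.getElem?_eq_getElem hi, hcur]
        have hvm : current ∉ visited := fun hm => by
          rw [(PySem.Set.contains_iff _ _).2 hm] at hv; cases hv
        have hvadd : PySem.Set.add visited current = visited ++ [current] :=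
          PySem.Set.add_of_not_mem hvm
        obtain ⟨e1, e2, e3, e4, e5, e6⟩ :=
          pvFold_sim av (visited ++ [current]) allU (pvGetNbrs g current) order rest (i + 1)
            hpend' htake' h3
            (fun x hx => hU x (pvGetNbrs_subset g current x hx))
            h4 (by omega)
        have hlen : order.length ≤ allU.length :=
          ((h3.subperm (fun x hx => h4 x hx)).length_le)
        cases fB with
        | zero => omega
        | succ fB =>
          rw [pvALoop]
          simp only [hv, Bool.false_eq_true, if_false]
          rw [pvBLoop]
          simp only [hi, if_true]
          have hgetD : order.getD i "" = current := by
            rw [List.getD_eq_getElem order "" hi, hcur]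
          rw [hgetD, hvadd]
          rw [← e1] at e2 ⊢
          exact ih fB (visited ++ [current])
            ((pvGetNbrs g current).foldl (pvAInner av (visited ++ [current])) (order, rest)).2
            (((pvGetNbrs g current).foldl (pvAInner av (visited ++ [current])) (order, rest)).1) (i + 1)
            e2 (e1 ▸ e3) (e1 ▸ e4) (e1 ▸ e5)
            (by
              have hlen2 := pvAInner_len av (visited ++ [current]) (pvGetNbrs g current) (order, rest)
              have hpot := pvPot_step g visited current hv
              simp only [List.length_cons] at hfA
              simp only at hlen2
              omega)
            (by omega)
      · have hpc : pvPend visited rest = order.drop i := by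
          rw [← h1, pvPend_cons_mem _ _ _ hv]
        rw [pvALoop]
        simp only [hv, if_true]
        exact ih fB visited rest order i hpc h2 h3 h4 (by simp at hfA; omega) hfB

-- ---- bridge: the fixpoint sweeps of B equal the index scan pvBLoop ----

-- 'p is saturated w.r.t. group': every available neighbour of p is already in group
def pvSatP (g : List (String × List String)) (av : List String) (group : List String) (p : String) : Prop :=
  ∀ c ∈ pvGetNbrs g p, av.contains c = true → c ∈ group

-- plain (flag-free) state of one sweep step
def pvStep (g : List (String × List String)) (av : List String) (a : List String) (p : String) : List String :=
  (pvGetNbrs g p).foldl (pvBInner av) a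

theorem pvBInner_prefix (av : List String) (L : List String) :
    ∀ acc : List String, acc <+: L.foldl (pvBInner av) acc := by
  induction L with
  | nil => intro acc; exact List.prefix_rfl
  | cons c L ih =>
    intro acc
    simp only [List.foldl_cons]
    refine List.IsPrefix.trans ?_ (ih (pvBInner av acc c))
    unfold pvBInner
    split
    · exact List.prefix_append acc [c]
    · exact List.prefix_rfl

theorem pvBInner_sat (av : List String) (L : List String) :
    ∀ acc : List String, ∀ c ∈ L, av.contains c = true → c ∈ L.foldl (pvBInner av) acc := by
  induction L with
  | nil => intro acc c hc; cases hc
  | cons d L ih =>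
    intro acc c hc hav
    simp only [List.foldl_cons]
    rcases List.mem_cons.1 hc with he | hm
    · subst he
      have hmem : c ∈ pvBInner av acc c := by
        unfold pvBInner
        by_cases hacc : c ∈ acc
        · simp [hacc]
        · have hav' : c ∈ av := by simpa using hav
          simp [hav', hacc]
      exact (pvBInner_prefix av L (pvBInner av acc c)).subset hmem
    · exact ih (pvBInner av acc d) c hm hav

theorem pvBInner_mem (av : List String) (L : List String) :
    ∀ acc x, x ∈ L.foldl (pvBInner av) acc → x ∈ acc ∨ x ∈ L := by
  induction L with
  | nil => intro acc x hx; exact Or.inl hx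
  | cons c L ih =>
    intro acc x hx
    simp only [List.foldl_cons] at hx
    rcases ih (pvBInner av acc c) x hx with hm | hm
    · unfold pvBInner at hm
      split at hm
      · rcases List.mem_append.1 hm with h | h
        · exact Or.inl h
        · exact Or.inr (List.mem_cons.2 (Or.inl (List.mem_singleton.1 h)))
      · exact Or.inl hm
    · exact Or.inr (List.mem_cons_of_mem _ hm)

-- flag-carrying inner fold vs its flag-free projection
theorem pvBInner2_fst (av : List String) (L : List String) :
    ∀ acc flag, (L.foldl (pvBInner2 av) (acc, flag)).1 = L.foldl (pvBInner av) acc := by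
  induction L with
  | nil => intro acc flag; rfl
  | cons c L ih =>
    intro acc flag
    simp only [List.foldl_cons]
    unfold pvBInner2 pvBInner
    split
    · exact ih (acc ++ [c]) true
    · exact ih acc flag

theorem pvBInner2_flag (av : List String) (L : List String) :
    ∀ acc flag, (L.foldl (pvBInner2 av) (acc, flag)).2 = false →
      flag = false ∧ L.foldl (pvBInner av) acc = acc := by
  induction L with
  | nil => intro acc flag h; exact ⟨h, rfl⟩
  | cons c L ih =>
    intro acc flag h
    simp only [List.foldl_cons] at h ⊢
    unfold pvBInner2 at h
    unfold pvBInner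
    split at h
    · rename_i hcond
      exact absurd (ih _ true h).1 (by simp)
    · rename_i hcond
      rw [if_neg hcond]
      exact ih acc flag h

-- one sweep (flag-carrying) vs its flag-free projection
theorem pvNbrFold_fst (g : List (String × List String)) (av : List String) (L : List String) :
    ∀ acc flag, (L.foldl (pvNbrFold g av) (acc, flag)).1 = L.foldl (pvStep g av) acc := by
  induction L with
  | nil => intro acc flag; rfl
  | cons p L ih =>
    intro acc flag
    simp only [List.foldl_cons]
    unfold pvNbrFold
    have hpair : (pvGetNbrs g p).foldl (pvBInner2 av) (acc, flag)
        = (pvStep g av acc p, ((pvGetNbrs g p).foldl (pvBInner2 av) (acc, flag)).2) := by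
      have := pvBInner2_fst av (pvGetNbrs g p) acc flag
      exact Prod.ext this rfl
    rw [hpair]
    exact ih _ _

theorem pvNbrFold_flag (g : List (String × List String)) (av : List String) (L : List String) :
    ∀ acc flag, (L.foldl (pvNbrFold g av) (acc, flag)).2 = false →
      flag = false ∧ L.foldl (pvStep g av) acc = acc := by
  induction L with
  | nil => intro acc flag h; exact ⟨h, rfl⟩
  | cons p L ih =>
    intro acc flag h
    simp only [List.foldl_cons] at h ⊢
    unfold pvNbrFold at h
    have hpair : (pvGetNbrs g p).foldl (pvBInner2 av) (acc, flag)
        = (pvStep g av acc p, ((pvGetNbrs g p).foldl (pvBInner2 av) (acc, flag)).2) :=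
      Prod.ext (pvBInner2_fst av (pvGetNbrs g p) acc flag) rfl
    rw [hpair] at h
    obtain ⟨hf1, hrest⟩ := ih _ _ h
    obtain ⟨hf0, hstep⟩ := pvBInner2_flag av (pvGetNbrs g p) acc flag hf1
    refine ⟨hf0, ?_⟩
    have hstep' : pvStep g av acc p = acc := hstep
    rw [hstep'] at hrest ⊢
    exact hrest

-- a sweep over saturated members is a no-op
theorem pvNoop (g : List (String × List String)) (av : List String) (P : List String) :
    ∀ acc flag, (∀ p ∈ P, pvSatP g av acc p) →
      P.foldl (pvNbrFold g av) (acc, flag) = (acc, flag) := by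
  induction P with
  | nil => intro acc flag _; rfl
  | cons p P ih =>
    intro acc flag hsat
    simp only [List.foldl_cons]
    have hstep : pvNbrFold g av (acc, flag) p = (acc, flag) := by
      unfold pvNbrFold
      have hsp := hsat p List.mem_cons_self
      have : ∀ ns : List String, (∀ c ∈ ns, av.contains c = true → c ∈ acc) →
          ns.foldl (pvBInner2 av) (acc, flag) = (acc, flag) := by
        intro ns
        induction ns with
        | nil => intro _; rfl
        | cons c ns ihn =>
          intro hns
          simp only [List.foldl_cons]
          have hc : pvBInner2 av (acc, flag) c = (acc, flag) := by
            unfold pvBInner2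
            cases hav : av.contains c
            · simp
            · have := hns c List.mem_cons_self hav
              simp [this]
          rw [hc]
          exact ihn (fun d hd hda => hns d (List.mem_cons_of_mem _ hd) hda)
      exact this _ hsp
    rw [hstep]
    exact ih acc flag (fun q hq => hsat q (List.mem_cons_of_mem _ hq))

-- plain sweep suffix vs the index loop: processing the snapshot tail L one member at a time
theorem pvRoundSim (g : List (String × List String)) (av : List String) :
    ∀ (L acc : List String) (i fB : Nat),
      L <+: acc.drop i →
      pvBLoop g av (L.length + fB) acc i
          = pvBLoop g av fB (L.foldl (pvStep g av) acc) (i + L.length)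
      ∧ acc <+: L.foldl (pvStep g av) acc
      ∧ (∀ p ∈ L, pvSatP g av (L.foldl (pvStep g av) acc) p) := by
  intro L
  induction L with
  | nil =>
    intro acc i fB _
    refine ⟨by simp, List.prefix_rfl, by intro p hp; cases hp⟩
  | cons p L ih =>
    intro acc i fB hpre
    obtain ⟨t, ht⟩ := hpre
    have hdropi : acc.drop i = p :: (L ++ t) := by
      rw [← ht]; rfl
    have hi : i < acc.length := by
      by_contra hge
      rw [List.drop_eq_nil_of_le (by omega)] at hdropi
      cases hdropi
    have hgetE : acc.drop i = acc[i] :: acc.drop (i + 1) := List.drop_eq_getElem_cons hi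
    have hcur : acc[i] = p := by
      rw [hgetE] at hdropi
      exact (List.cons.injEq _ _ _ _ ▸ hdropi).1
    have hdrop1 : acc.drop (i + 1) = L ++ t := by
      rw [hgetE] at hdropi
      exact (List.cons.injEq _ _ _ _ ▸ hdropi).2
    set acc1 := pvStep g av acc p with hacc1
    have hpref1 : acc <+: acc1 := pvBInner_prefix av (pvGetNbrs g p) acc
    obtain ⟨e, he⟩ := hpref1
    have hpre' : L <+: acc1.drop (i + 1) := by
      rw [← he, List.drop_append_of_le_length (by omega), hdrop1, List.append_assoc]
      exact ⟨t ++ e, rfl⟩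
    obtain ⟨ih1, ih2, ih3⟩ := ih acc1 (i + 1) fB hpre'
    have hfuel : (p :: L).length + fB = (L.length + fB) + 1 := by
      simp only [List.length_cons]; omega
    have hstepB : pvBLoop g av ((p :: L).length + fB) acc i
        = pvBLoop g av (L.length + fB) acc1 (i + 1) := by
      rw [hfuel, pvBLoop]
      simp only [hi, if_true]
      have hgetD : acc.getD i "" = p := by
        rw [List.getD_eq_getElem acc "" hi, hcur]
      rw [hgetD, hacc1]
      rfl
    have hfold : (p :: L).foldl (pvStep g av) acc = L.foldl (pvStep g av) acc1 := by
      simp only [List.foldl_cons, hacc1]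
    refine ⟨?_, ?_, ?_⟩
    · rw [hstepB, ih1, hfold]
      have : i + (p :: L).length = (i + 1) + L.length := by
        simp only [List.length_cons]; omega
      rw [this]
    · rw [hfold]
      exact List.IsPrefix.trans ⟨e, he⟩ ih2
    · intro q hq
      rcases List.mem_cons.1 hq with he' | hm
      · subst he'
        rw [hfold]
        intro c hc hav
        have hc1 : c ∈ acc1 := pvBInner_sat av (pvGetNbrs g q) acc c hc hav
        exact ih2.subset hc1
      · rw [hfold]
        exact ih3 q hm

-- one sweep's flag-free result keeps Nodup and stays inside allU
theorem pvStep_nodup (g : List (String × List String)) (av : List String) (L : List String) :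
    ∀ acc, acc.Nodup → (L.foldl (pvStep g av) acc).Nodup := by
  induction L with
  | nil => intro acc h; exact h
  | cons p L ih =>
    intro acc h
    simp only [List.foldl_cons]
    exact ih _ (pvBInner_nodup av (pvGetNbrs g p) acc h)

theorem pvStep_subset (g : List (String × List String)) (av : List String) (allU : List String)
    (hU : ∀ x ∈ (g.map (·.2)).flatten, x ∈ allU) (L : List String) :
    ∀ acc, (∀ x ∈ acc, x ∈ allU) → ∀ x ∈ L.foldl (pvStep g av) acc, x ∈ allU := by
  induction L with
  | nil => intro acc h x hx; exact h x hx
  | cons p L ih =>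
    intro acc h x hx
    simp only [List.foldl_cons] at hx
    refine ih (pvStep g av acc p) ?_ x hx
    intro y hy
    rcases pvBInner_mem av (pvGetNbrs g p) acc y hy with hm | hm
    · exact h y hm
    · exact hU y (pvGetNbrs_subset g p y hm)

-- main bridge: the fixpoint of sweeps equals the index scan
theorem pvBridge (g : List (String × List String)) (av : List String) (allU : List String)
    (hU : ∀ x ∈ (g.map (·.2)).flatten, x ∈ allU) :
    ∀ fF (group : List String) (i fB : Nat),
      (∀ p ∈ group.take i, pvSatP g av group p) →
      group.Nodup →
      (∀ x ∈ group, x ∈ allU) →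
      i ≤ group.length →
      allU.length ≤ fB + i →
      allU.length + 1 ≤ fF + i →
      pvBLoop g av fB group i = pvFix g av fF group := by
  intro fF
  induction fF with
  | zero =>
    intro group i fB _ hnd hsub hi _ hfF
    have hlen : group.length ≤ allU.length := (hnd.subperm (fun x hx => hsub x hx)).length_le
    omega
  | succ fF ih =>
    intro group i fB hsat hnd hsub hi hfB hfF
    have hlen : group.length ≤ allU.length := (hnd.subperm (fun x hx => hsub x hx)).length_le
    set L := group.drop i with hL
    have hLlen : L.length = group.length - i := by rw [hL, List.length_drop]
    have hfBsplit : fB = L.length + (fB - L.length) := by omega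
    have hpass : pvPass g av group = L.foldl (pvNbrFold g av) (group, false) := by
      unfold pvPass
      rw [show List.foldl (pvNbrFold g av) (group, false) group
            = List.foldl (pvNbrFold g av) (group, false) (group.take i ++ group.drop i) by
          rw [List.take_append_drop],
        List.foldl_append, pvNoop g av (group.take i) group false hsat]
    obtain ⟨hsimEq, hpref, hsatL⟩ := pvRoundSim g av L group i (fB - L.length) List.prefix_rfl
    set acc' := L.foldl (pvStep g av) group with hacc'
    have hfst : (pvPass g av group).1 = acc' := by
      rw [hpass]
      exact pvNbrFold_fst g av L group false
    have hBL : pvBLoop g av fB group i = pvBLoop g av (fB - L.length) acc' (i + L.length) := by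
      conv_lhs => rw [hfBsplit]
      exact hsimEq
    have hiL : i + L.length = group.length := by omega
    rw [pvFix]
    cases hflag : (pvPass g av group).2
    · -- no change: sweep was a no-op, both sides return group
      simp only [Bool.false_eq_true, if_false]
      rw [hpass] at hflag
      obtain ⟨-, hstable⟩ := pvNbrFold_flag g av L group false hflag
      rw [hBL, ← hacc'] at *
      rw [hstable] at hBL ⊢
      rw [hfst]
      rw [hBL, hiL, pvBLoop_done g av _ group group.length (le_refl _)]
      rw [hstable]
    · -- change: recurse on the grown group
      simp only [if_true]
      rw [hfst]
      obtain ⟨e, he⟩ := hpref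
      have hLne : L ≠ [] := by
        intro hnil
        rw [hpass, hnil] at hflag
        simp at hflag
      have hL1 : 0 < L.length := List.length_pos_iff.mpr hLne
      have hpre2 : group <+: acc' := ⟨e, he⟩
      have hsat' : ∀ p ∈ acc'.take group.length, pvSatP g av acc' p := by
        intro p hp
        have htk : acc'.take group.length = group := by
          rw [← he, List.take_left]
        rw [htk] at hp
        rcases List.mem_append.1 (by rw [List.take_append_drop i group]; exact hp :
            p ∈ group.take i ++ group.drop i) with hm | hm
        · intro c hc hav
          exact List.IsPrefix.subset hpre2 (hsat p hm c hc hav)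
        · exact hsatL p hm
      have hnd' : acc'.Nodup := pvStep_nodup g av L group hnd
      have hsub' : ∀ x ∈ acc', x ∈ allU := pvStep_subset g av allU hU L group hsub
      have hglen : group.length ≤ acc'.length := List.IsPrefix.length_le hpre2
      rw [hBL, hiL]
      exact ih acc' group.length (fB - L.length) hsat' hnd' hsub' hglen (by omega) (by omega)

-- ===== VERDICT (by name: the statement is the Claim_ definition above) =====
theorem find_conflict_group_py_spec : Claim_equal_find_conflict_group_py := by
  intro s g av _hDom
  unfold Spec_find_conflict_group_py find_conflict_group_py find_conflict_group_py_alt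
  have hnodup : ([s] : List String).Nodup := List.nodup_singleton s
  have hpend : pvPend PySem.Set.empty [s] = ([s] : List String).drop 0 := rfl
  have htake : ([s] : List String).take 0 = PySem.Set.empty := rfl
  have hsub : ∀ x ∈ ([s] : List String), x ∈ s :: (g.map (·.2)).flatten := by
    intro x hx
    rw [List.mem_singleton.1 hx]
    exact List.mem_cons_self
  have hpot0 : pvPot g PySem.Set.empty = (g.map (fun p => p.2.length)).sum := by
    simp [pvPot, PySem.Set.empty]
  have hfa : ([s] : List String).length + pvPot g PySem.Set.empty
      ≤ 1 + (g.map (fun p => p.2.length)).sum := by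
    rw [hpot0]
    simp
  have hflat : ((g.map (·.2)).flatten).length = (g.map (fun p => p.2.length)).sum := by
    rw [List.length_flatten, List.map_map]
    rfl
  have hfb : (s :: (g.map (·.2)).flatten).length
      ≤ (1 + (g.map (fun p => p.2.length)).sum) + 0 := by
    simp [List.length_cons, hflat]
  have hU : ∀ x ∈ (g.map (·.2)).flatten, x ∈ s :: (g.map (·.2)).flatten :=
    fun x hx => List.mem_cons_of_mem _ hx
  have hmain := pvSim g av (s :: (g.map (·.2)).flatten) hU
    (1 + (g.map (fun p => p.2.length)).sum) (1 + (g.map (fun p => p.2.length)).sum)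
    PySem.Set.empty [s] [s] 0 hpend htake hnodup hsub hfa hfb
  have hbridge := pvBridge g av (s :: (g.map (·.2)).flatten) hU
    (2 + (g.map (fun p => p.2.length)).sum) [s] 0 (1 + (g.map (fun p => p.2.length)).sum)
    (by intro p hp; cases hp) hnodup hsub (by simp)
    (by rw [List.length_cons, hflat]; omega)
    (by rw [List.length_cons, hflat]; omega)
  rw [show (PySem.Set.empty.add s : PySem.Set String) = [s] from rfl, hmain, hbridge]
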